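-- pv_equiv track=rewrite | github.com/atevanderburgt/ABFGP | abfgp-2.f/lib_codingarray.py | get_ordered_array_window_scores
-- ===== SOURCE A (Python) =====
-- def get_ordered_array_window_scores(arrayobj,window_aa_size):
--     """ """
--     array_windows = []
--     offset_start = 0
--     offset_end   = len(arrayobj)-1
--     while arrayobj[offset_start] == 0: offset_start+=1
--     while arrayobj[offset_end] == 0:   offset_end-=1
--     offset_end+=1
--
--     for offset in range(offset_start,offset_end):
--         window = arrayobj[offset:offset+window_aa_size]
--         total = sum(window)
--         if total != 0: array_windows.append(total)
--     array_windows.sort()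
--     array_windows.reverse()
--     return array_windows
-- ===== SOURCE B (Python) =====
-- def get_ordered_array_window_scores(arrayobj, window_aa_size):
--     """Descending list of nonzero sliding-window sums, computed with prefix sums."""
--     n = len(arrayobj)
--     start = next(i for i, v in enumerate(arrayobj) if v)
--     end = n - next(i for i, v in enumerate(reversed(arrayobj)) if v)
--     prefix = [0]
--     for v in arrayobj:
--         prefix.append(prefix[-1] + v)
--     result = []
--     for o in range(start, end):
--         t = prefix[min(n, o + window_aa_size)] - prefix[o]
--         if t:
--             result.append(t)
--     result.sort(reverse=True)
--     return result
-- ===== Notes on version B (the rewrite author's own statement) =====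
-- stated objective: faster
-- what changed: B finds the first/last nonzero offsets with single scans and builds a prefix-sum array so each window total is one O(1) subtraction instead of materialising and summing an O(w) slice per offset; Pre_ additionally excludes negative window sizes (outside the task's natural domain), where A's value comes from Python's negative-index slice wraparound.
-- outside the precondition, e.g. on get_ordered_array_window_scores([1, 2], -1): A returns [1], B returns [3, -1]
import Mathlib
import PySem

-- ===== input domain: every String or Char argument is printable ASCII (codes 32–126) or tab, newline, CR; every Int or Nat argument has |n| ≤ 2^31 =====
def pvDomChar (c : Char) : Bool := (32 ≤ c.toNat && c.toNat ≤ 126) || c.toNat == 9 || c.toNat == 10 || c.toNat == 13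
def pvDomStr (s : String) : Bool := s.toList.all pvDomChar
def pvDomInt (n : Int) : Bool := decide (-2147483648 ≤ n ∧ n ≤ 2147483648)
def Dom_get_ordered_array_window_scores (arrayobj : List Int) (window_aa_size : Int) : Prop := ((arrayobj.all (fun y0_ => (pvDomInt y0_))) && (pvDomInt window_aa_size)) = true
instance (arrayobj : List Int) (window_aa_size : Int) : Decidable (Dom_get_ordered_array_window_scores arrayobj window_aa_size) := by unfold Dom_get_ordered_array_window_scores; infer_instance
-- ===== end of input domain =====

-- B replaces A's per-offset slice-and-sum (O(w) each) by a prefix-sum array, so each window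
-- total is one subtraction; objective: faster (asymptotic, O(n*w) -> O(n) before the sort).

-- ===== PORT A =====
-- 'while arrayobj[offset_start] == 0: offset_start += 1' — structural scan keeping the running index
def pvScanStart : List Int → Nat → Nat
  | [], i => i
  | x :: xs, i => if x = 0 then pvScanStart xs (i + 1) else i

-- 'while arrayobj[offset_end] == 0: offset_end -= 1' — fueled loop over the SAME state, exact
-- Python indexing (negative indices wrap) via pyGet?; fuel 2*len+2 covers every index Python visits
def pvScanEnd (xs : List Int) : Nat → Int → Int
  | 0, i => i
  | fuel + 1, i =>
    match PySem.List.pyGet? xs i with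
    | some v => if v = 0 then pvScanEnd xs fuel (i - 1) else i
    | none => i

def get_ordered_array_window_scores (arrayobj : List Int) (window_aa_size : Int) : List Int :=
  let offset_start : Nat := pvScanStart arrayobj 0
  let offset_end : Int := pvScanEnd arrayobj (2 * arrayobj.length + 2) ((arrayobj.length : Int) - 1) + 1
  let array_windows := (PySem.List.pyRange (offset_start : Int) offset_end 1).foldl
    (fun acc offset =>
      let window := PySem.List.slice arrayobj (some offset) (some (offset + window_aa_size))
      let total := window.sum
      if total ≠ 0 then acc ++ [total] else acc) []
  (PySem.List.sorted array_windows (fun x => x) false).reverse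

-- ===== PORT B =====
-- 'prefix = [0]; for v in arrayobj: prefix.append(prefix[-1] + v)' — running last element as accumulator
def pvPrefix : Int → List Int → List Int
  | acc, [] => [acc]
  | acc, v :: rest => acc :: pvPrefix (acc + v) rest

def get_ordered_array_window_scores_alt (arrayobj : List Int) (window_aa_size : Int) : List Int :=
  let n : Int := arrayobj.length
  let start : Nat := arrayobj.findIdx (fun v => v != 0)
  let stop : Int := n - arrayobj.reverse.findIdx (fun v => v != 0)
  let pref := pvPrefix 0 arrayobj
  let result := (PySem.List.pyRange (start : Int) stop 1).foldl
    (fun acc o =>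
      let t : Int := PySem.List.pyGetD pref (min n (o + window_aa_size)) 0
                       - PySem.List.pyGetD pref o 0
      if t ≠ 0 then acc ++ [t] else acc) []
  PySem.List.sorted result (fun x => x) true

-- ===== PRECONDITION & SPEC =====
-- A raises IndexError when arrayobj is empty or all-zero (both boundary scans run off the array).
-- Pre_ also requires window_aa_size ≥ 0: a negative window size is outside the task's natural
-- domain, and A's value there (it still returns one) is an accident of Python's negative-index
-- slice wraparound, which B's prefix-sum algorithm has no reason to mimic.
def Pre_get_ordered_array_window_scores (arrayobj : List Int) (window_aa_size : Int) : Prop :=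
  arrayobj.any (fun v => v != 0) = true ∧ 0 ≤ window_aa_size
instance (arrayobj : List Int) (window_aa_size : Int) : Decidable (Pre_get_ordered_array_window_scores arrayobj window_aa_size) := by unfold Pre_get_ordered_array_window_scores; infer_instance

def pvWitness_get_ordered_array_window_scores : List Int × Int := ([0, 1, 2, 0], 2)

def Spec_get_ordered_array_window_scores (arrayobj : List Int) (window_aa_size : Int) (out : List Int) : Prop := out = get_ordered_array_window_scores_alt arrayobj window_aa_size
instance (arrayobj : List Int) (window_aa_size : Int) (out : List Int) : Decidable (Spec_get_ordered_array_window_scores arrayobj window_aa_size out) := by unfold Spec_get_ordered_array_window_scores; infer_instance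

-- ===== CLAIM (what is proved, stated in full; the proofs are below) =====
def Claim_equal_get_ordered_array_window_scores : Prop := ∀ (arrayobj : List Int) (window_aa_size : Int), Dom_get_ordered_array_window_scores arrayobj window_aa_size → Pre_get_ordered_array_window_scores arrayobj window_aa_size → Spec_get_ordered_array_window_scores arrayobj window_aa_size (get_ordered_array_window_scores arrayobj window_aa_size)

-- ===== LEMMAS AND PROOFS =====

theorem pvScanStart_eq (xs : List Int) (i : Nat) :
    pvScanStart xs i = i + xs.findIdx (fun v => v != 0) := by
  induction xs generalizing i with
  | nil => simp [pvScanStart]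
  | cons x t ih =>
    by_cases hx : x = 0
    · have hb : (x != 0) = false := by simpa using hx
      simp [pvScanStart, hx, List.findIdx_cons, ih]
      omega
    · have hb : (x != 0) = true := by simpa using hx
      simp [pvScanStart, hx, List.findIdx_cons, hb]

theorem pvScanEnd_eq (xs : List Int) (fuel k : Nat)
    (hj : xs.reverse.findIdx (fun v => v != 0) < xs.length)
    (hk : k ≤ xs.reverse.findIdx (fun v => v != 0))
    (hf : xs.reverse.findIdx (fun v => v != 0) < k + fuel) :
    pvScanEnd xs fuel ((xs.length : Int) - 1 - k)
      = (xs.length : Int) - 1 - xs.reverse.findIdx (fun v => v != 0) := by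
  induction fuel generalizing k with
  | zero => omega
  | succ m ih =>
    have hkn : k < xs.length := lt_of_le_of_lt hk hj
    have h0 : (0 : Int) ≤ (xs.length : Int) - 1 - k := by omega
    have h1 : (xs.length : Int) - 1 - k < (xs.length : Int) := by omega
    have htn : ((xs.length : Int) - 1 - k).toNat = xs.length - 1 - k := by omega
    have hlt : xs.length - 1 - k < xs.length := by omega
    have hkr : k < xs.reverse.length := by simpa using hkn
    have hrev : xs.reverse[k]'hkr = xs[xs.length - 1 - k]'hlt := List.getElem_reverse hkr
    rw [pvScanEnd, PySem.List.pyGet?_eq_some_getElem xs h0 h1]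
    simp only [htn]
    by_cases hkj : k = xs.reverse.findIdx (fun v => v != 0)
    · subst hkj
      have hne : ¬ xs[xs.length - 1 - List.findIdx (fun v => v != 0) xs.reverse]'hlt = 0 := by
        have h := List.findIdx_getElem (p := fun v => v != 0) (xs := xs.reverse)
          (w := by simpa using hj)
        rw [List.getElem_reverse] at h
        simpa using h
      rw [if_neg hne]
    · have hklt : k < xs.reverse.findIdx (fun v => v != 0) := lt_of_le_of_ne hk hkj
      have hz : (fun v => v != 0) (xs.reverse[k]'hkr) = false := List.not_of_lt_findIdx hklt
      have hz0 : xs[xs.length - 1 - k]'hlt = 0 := by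
        have h : xs.reverse[k]'hkr = 0 := by simpa using hz
        rw [List.getElem_reverse] at h
        exact h
      rw [if_pos hz0]
      have harg : (xs.length : Int) - 1 - k - 1 = (xs.length : Int) - 1 - (k + 1) := by omega
      rw [harg]
      exact ih (k + 1) (by omega) (by omega)

theorem pvPrefix_getD (xs : List Int) (c : Int) (k : Nat) (hk : k ≤ xs.length) :
    (pvPrefix c xs).getD k 0 = c + (xs.take k).sum := by
  induction xs generalizing c k with
  | nil =>
    have : k = 0 := by simpa using hk
    simp [this, pvPrefix]
  | cons x t ih =>
    cases k with
    | zero => simp [pvPrefix]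
    | succ k' =>
      have hk' : k' ≤ t.length := by simpa using hk
      show (c :: pvPrefix (c + x) t).getD (k' + 1) 0 = c + ((x :: t).take (k' + 1)).sum
      rw [List.getD_cons_succ, ih (c + x) k' hk', List.take_succ_cons, List.sum_cons]
      ring

theorem pvPrefix_length (c : Int) (xs : List Int) : (pvPrefix c xs).length = xs.length + 1 := by
  induction xs generalizing c with
  | nil => simp [pvPrefix]
  | cons x t ih => simp [pvPrefix, ih]

theorem pvSumDropTake (xs : List Int) (a m : Nat) :
    ((xs.drop a).take m).sum = (xs.take (a + m)).sum - (xs.take a).sum := by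
  rw [List.take_add]
  simp

theorem pvTakeCongr {α : Type} (l : List α) (a b : Nat)
    (h : min a l.length = min b l.length) : l.take a = l.take b := by
  by_cases ha : a ≤ l.length <;> by_cases hb : b ≤ l.length
  · have : a = b := by omega
    rw [this]
  · have : a = l.length := by omega
    rw [this, List.take_length, List.take_of_length_le (by omega)]
  · have : b = l.length := by omega
    rw [this, List.take_length, List.take_of_length_le (by omega)]
  · rw [List.take_of_length_le (by omega), List.take_of_length_le (by omega)]

-- the heart of the equivalence: one window's slice-sum equals B's prefix-difference
theorem pvWindowEq (xs : List Int) (w o : Int) (h0 : 0 ≤ o) (h1 : o < (xs.length : Int))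
    (hw : 0 ≤ w) :
    (PySem.List.slice xs (some o) (some (o + w))).sum
      = PySem.List.pyGetD (pvPrefix 0 xs) (min (xs.length : Int) (o + w)) 0
        - PySem.List.pyGetD (pvPrefix 0 xs) o 0 := by
  have hplen : (pvPrefix 0 xs).length = xs.length + 1 := pvPrefix_length 0 xs
  set hi : Int := min (xs.length : Int) (o + w) with hhi
  have hhi0 : 0 ≤ hi := by rw [hhi]; omega
  have hhin : hi ≤ (xs.length : Int) := by rw [hhi]; omega
  have hgd : ∀ (i : Int), 0 ≤ i → i ≤ (xs.length : Int) →
      PySem.List.pyGetD (pvPrefix 0 xs) i 0 = (xs.take i.toNat).sum := by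
    intro i hia hib
    rw [show i = ((i.toNat : Nat) : Int) from (Int.toNat_of_nonneg hia).symm,
        PySem.List.pyGetD_natCast, pvPrefix_getD xs 0 i.toNat (by omega)]
    simp [max_eq_left hia]
  rw [hgd hi hhi0 hhin, hgd o h0 (by omega)]
  have hsl : PySem.List.slice xs (some o) (some (o + w))
      = (xs.drop (PySem.List.clampIdx xs.length o)).take
          (PySem.List.clampIdx xs.length (o + w) - PySem.List.clampIdx xs.length o) := rfl
  have hca : PySem.List.clampIdx xs.length o = o.toNat := by
    simp only [PySem.List.clampIdx]
    rw [if_neg (by omega)]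
    omega
  rw [hsl, pvSumDropTake, hca]
  have htk : xs.take (o.toNat + (PySem.List.clampIdx xs.length (o + w) - o.toNat))
      = xs.take hi.toNat := by
    apply pvTakeCongr
    simp only [PySem.List.clampIdx]
    rw [hhi]
    split_ifs <;> omega
  rw [htk]

theorem pvSortedRevEq (l : List Int) :
    (PySem.List.sorted l (fun x => x) false).reverse = PySem.List.sorted l (fun x => x) true := by
  apply PySem.List.eq_of_perm_of_pairwise_le_of_injective (fun x : Int => -x) neg_injective
  · exact (List.reverse_perm _).trans ((PySem.List.sorted_perm l (fun x => x) false).trans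
      (PySem.List.sorted_perm l (fun x => x) true).symm)
  · rw [List.pairwise_reverse]
    have := PySem.List.sorted_pairwise l (fun x => x)
    exact this.imp (by intro a b h; simpa using h)
  · have := PySem.List.sorted_pairwise_rev l (fun x => x)
    exact this.imp (by intro a b h; simpa using h)

-- ===== VERDICT (by name: the statement is the Claim_ definition above) =====
theorem get_ordered_array_window_scores_spec : Claim_equal_get_ordered_array_window_scores := by
  intro xs w _hdom hpre
  unfold Spec_get_ordered_array_window_scores
  unfold Pre_get_ordered_array_window_scores at hpre
  obtain ⟨hpre, hw⟩ := hpre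
  have hex : ∃ x ∈ xs, (x != 0) = true := List.any_eq_true.mp hpre
  have hs : xs.findIdx (fun v => v != 0) < xs.length := List.findIdx_lt_length.mpr hex
  have hj : xs.reverse.findIdx (fun v => v != 0) < xs.length := by
    have hex' : ∃ x ∈ xs.reverse, (x != 0) = true := by
      obtain ⟨x, hx, hpx⟩ := hex
      exact ⟨x, by simpa using hx, hpx⟩
    simpa using List.findIdx_lt_length.mpr hex'
  have hA : get_ordered_array_window_scores xs w
      = (PySem.List.sorted ((PySem.List.pyRange ((pvScanStart xs 0 : Nat) : Int)
          (pvScanEnd xs (2 * xs.length + 2) ((xs.length : Int) - 1) + 1) 1).foldl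
          (fun acc offset =>
            if (PySem.List.slice xs (some offset) (some (offset + w))).sum ≠ 0
            then acc ++ [(PySem.List.slice xs (some offset) (some (offset + w))).sum]
            else acc) []) (fun x => x) false).reverse := rfl
  have hB : get_ordered_array_window_scores_alt xs w
      = PySem.List.sorted ((PySem.List.pyRange ((xs.findIdx (fun v => v != 0) : Nat) : Int)
          ((xs.length : Int) - xs.reverse.findIdx (fun v => v != 0)) 1).foldl
          (fun acc o =>
            if (PySem.List.pyGetD (pvPrefix 0 xs) (min (xs.length : Int) (o + w)) 0
                - PySem.List.pyGetD (pvPrefix 0 xs) o 0) ≠ 0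
            then acc ++ [PySem.List.pyGetD (pvPrefix 0 xs) (min (xs.length : Int) (o + w)) 0
                - PySem.List.pyGetD (pvPrefix 0 xs) o 0]
            else acc) []) (fun x => x) true := rfl
  have hend := pvScanEnd_eq xs (2 * xs.length + 2) 0 hj (by omega) (by omega)
  rw [show ((xs.length : Int) - 1 - ((0 : Nat) : Int)) = (xs.length : Int) - 1 from by
        push_cast; ring] at hend
  rw [hA, hB, pvScanStart_eq, hend]
  rw [show (xs.length : Int) - 1 - (xs.reverse.findIdx (fun v => v != 0) : Int) + 1
        = (xs.length : Int) - (xs.reverse.findIdx (fun v => v != 0) : Int) from by omega]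
  rw [← pvSortedRevEq]
  congr 2
  simp only [Nat.zero_add]
  apply PySem.List.foldl_congr_mem
  intro acc o ho
  obtain ⟨hlo, hhi⟩ := PySem.List.mem_pyRange_one.mp ho
  have h0 : 0 ≤ o := le_trans (by positivity) hlo
  have h1 : o < (xs.length : Int) := by omega
  simp only [pvWindowEq xs w o h0 h1 hw]
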